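-- pv_equiv track=rewrite | github.com/RealistikOsu/RealistikPanel | functions.py | SplitListTrue
-- ===== SOURCE A (Python) =====
-- def SplitListTrue(TheList : list):
--     """Splits list into 2 halves."""
--     """
--     length = len(TheList)
--     return [ TheList[i*length // 2: (i+1)*length // 2]
--             for i in range(2) ]
--     """
--     Cool = 0
--     List1 = []
--     List2 = []
--     for Thing in TheList:
--         if Cool == 0:
--             List1.append(Thing)
--             Cool = 1
--         else:
--             List2.append(Thing)
--             Cool = 0
--     return [List1, List2]
-- ===== SOURCE B (Python) =====
-- def SplitListTrue(TheList: list):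
--     """Splits list into 2 halves (even-indexed and odd-indexed elements)."""
--     return [[x for i, x in enumerate(TheList) if i % 2 == 0],
--             [x for i, x in enumerate(TheList) if i % 2 == 1]]
-- ===== Notes on version B (the rewrite author's own statement) =====
-- stated objective: idiomatic
-- what changed: Replaces the stateful Cool-flag toggle loop with two index-parity filter comprehensions over enumerate, one per half.
import Mathlib
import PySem

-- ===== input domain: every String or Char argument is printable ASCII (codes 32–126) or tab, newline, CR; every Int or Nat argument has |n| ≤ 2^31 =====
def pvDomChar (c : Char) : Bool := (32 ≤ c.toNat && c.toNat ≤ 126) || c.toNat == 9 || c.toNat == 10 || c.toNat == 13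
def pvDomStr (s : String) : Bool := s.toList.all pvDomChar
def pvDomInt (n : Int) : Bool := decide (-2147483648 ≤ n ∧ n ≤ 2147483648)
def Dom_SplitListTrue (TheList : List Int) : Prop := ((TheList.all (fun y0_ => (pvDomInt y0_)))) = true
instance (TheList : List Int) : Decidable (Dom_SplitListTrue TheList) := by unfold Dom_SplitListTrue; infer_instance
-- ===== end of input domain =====

-- B replaces A's flag-toggle accumulator loop with two index-parity filter
-- comprehensions over enumerate (objective: idiomatic, same cost).

-- ===== PORT A =====
-- state is (Cool, List1, List2), exactly A's loop variables
def SplitListTrue (TheList : List Int) : List (List Int) :=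
  let st := TheList.foldl
    (fun (st : Int × List Int × List Int) Thing =>
      if st.1 = 0 then (1, st.2.1 ++ [Thing], st.2.2)
      else (0, st.2.1, st.2.2 ++ [Thing]))
    (0, [], [])
  [st.2.1, st.2.2]

-- ===== PORT B =====
-- [x for i, x in enumerate(TheList) if i % 2 == 0] and the i % 2 == 1 comprehension
def SplitListTrue_alt (TheList : List Int) : List (List Int) :=
  [(PySem.List.enumerate TheList).filterMap
      (fun p => if p.1 % 2 = 0 then some p.2 else none),
   (PySem.List.enumerate TheList).filterMap
      (fun p => if p.1 % 2 = 1 then some p.2 else none)]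

-- ===== PRECONDITION & SPEC =====
def Spec_SplitListTrue (TheList : List Int) (out : List (List Int)) : Prop := out = SplitListTrue_alt TheList
instance (TheList : List Int) (out : List (List Int)) : Decidable (Spec_SplitListTrue TheList out) := by unfold Spec_SplitListTrue; infer_instance

-- ===== CLAIM (what is proved, stated in full; the proofs are below) =====
def Claim_equal_SplitListTrue : Prop := ∀ (TheList : List Int), Dom_SplitListTrue TheList → Spec_SplitListTrue TheList (SplitListTrue TheList)

-- ===== LEMMAS AND PROOFS =====

-- proof-side bridge: (even-indexed, odd-indexed) elements by two-at-a-time recursion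
def pvSplit : List Int → List Int × List Int
  | [] => ([], [])
  | [x] => ([x], [])
  | x :: y :: rest =>
    let p := pvSplit rest
    (x :: p.1, y :: p.2)

theorem pvSplit_cons (xs : List Int) : ∀ (x : Int),
    pvSplit (x :: xs) = (x :: (pvSplit xs).2, (pvSplit xs).1) := by
  induction xs using pvSplit.induct with
  | case1 => intro x; simp [pvSplit]
  | case2 y => intro x; simp [pvSplit]
  | case3 y z rest ih => intro x; simp [pvSplit, ih]

-- A's loop from flag 0 appends (pvSplit xs).1 to List1 and (pvSplit xs).2 to List2;
-- from flag 1 the roles swap.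
theorem pvFoldA_eq (xs : List Int) : ∀ (l1 l2 : List Int),
    (xs.foldl (fun (st : Int × List Int × List Int) Thing =>
        if st.1 = 0 then (1, st.2.1 ++ [Thing], st.2.2)
        else (0, st.2.1, st.2.2 ++ [Thing])) (0, l1, l2)).2
      = (l1 ++ (pvSplit xs).1, l2 ++ (pvSplit xs).2)
  ∧ (xs.foldl (fun (st : Int × List Int × List Int) Thing =>
        if st.1 = 0 then (1, st.2.1 ++ [Thing], st.2.2)
        else (0, st.2.1, st.2.2 ++ [Thing])) (1, l1, l2)).2
      = (l1 ++ (pvSplit xs).2, l2 ++ (pvSplit xs).1) := by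
  induction xs with
  | nil => intro l1 l2; simp [pvSplit]
  | cons x xs ih =>
    intro l1 l2
    constructor
    · simpa [pvSplit_cons, List.foldl_cons, List.append_assoc] using
        (ih (l1 ++ [x]) l2).2
    · simpa [pvSplit_cons, List.foldl_cons, List.append_assoc] using
        (ih l1 (l2 ++ [x])).1

-- B's parity filters over enumerate from an even (resp. odd) start index yield the
-- two components of pvSplit (resp. swapped).
theorem pvEnumFilter_eq (xs : List Int) : ∀ (s : Int),
    (s % 2 = 0 →
       (PySem.List.enumerate xs s).filterMap
           (fun p => if p.1 % 2 = 0 then some p.2 else none) = (pvSplit xs).1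
     ∧ (PySem.List.enumerate xs s).filterMap
           (fun p => if p.1 % 2 = 1 then some p.2 else none) = (pvSplit xs).2)
  ∧ (s % 2 = 1 →
       (PySem.List.enumerate xs s).filterMap
           (fun p => if p.1 % 2 = 0 then some p.2 else none) = (pvSplit xs).2
     ∧ (PySem.List.enumerate xs s).filterMap
           (fun p => if p.1 % 2 = 1 then some p.2 else none) = (pvSplit xs).1) := by
  induction xs with
  | nil => intro s; simp [PySem.List.enumerate, pvSplit]
  | cons x xs ih =>
    intro s
    constructor
    · intro hs
      have hs1 : (s + 1) % 2 = 1 := by omega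
      have h := (ih (s + 1)).2 hs1
      simp at h
      have hd : (2 : Int) ∣ s := by omega
      constructor
      · simp [PySem.List.enumerate, hd, hs, pvSplit_cons, h.1]
      · simp [PySem.List.enumerate, hd, hs, pvSplit_cons, h.2]
    · intro hs
      have hs0 : (s + 1) % 2 = 0 := by omega
      have h := (ih (s + 1)).1 hs0
      simp at h
      have hnd : ¬ (2 : Int) ∣ s := by omega
      constructor
      · simp [PySem.List.enumerate, hnd, hs, pvSplit_cons, h.1]
      · simp [PySem.List.enumerate, hnd, hs, pvSplit_cons, h.2]

-- ===== VERDICT (by name: the statement is the Claim_ definition above) =====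
theorem SplitListTrue_spec : Claim_equal_SplitListTrue := by
  intro TheList _
  show ([(TheList.foldl (fun (st : Int × List Int × List Int) Thing =>
            if st.1 = 0 then (1, st.2.1 ++ [Thing], st.2.2)
            else (0, st.2.1, st.2.2 ++ [Thing])) (0, [], [])).2.1,
         (TheList.foldl (fun (st : Int × List Int × List Int) Thing =>
            if st.1 = 0 then (1, st.2.1 ++ [Thing], st.2.2)
            else (0, st.2.1, st.2.2 ++ [Thing])) (0, [], [])).2.2] : List (List Int))
      = SplitListTrue_alt TheList
  have hA := (pvFoldA_eq TheList [] []).1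
  rw [Prod.ext_iff] at hA
  simp at hA
  have hB := (pvEnumFilter_eq TheList 0).1 (by norm_num)
  simp at hB
  simp [SplitListTrue_alt, hA.1, hA.2, hB.1, hB.2]
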